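-- pv_equiv track=rewrite | github.com/NathanKhoP/Mini-AES | mini_aes.py | mix_columns
-- ===== SOURCE A (Python) =====
-- def gf_multiply(a, b):
--     p = 0
--     for _ in range(4):
--         if b & 1:
--             p ^= a
--         hi_bit_set = a & 0x8
--         a <<= 1
--         if hi_bit_set:
--             a ^= 0x3 # Modulo x^4 + x + 1 -> 0b10011 -> XOR with 0011 (0x3) after shift
--             a &= 0xF # Keep it 4 bits
--         b >>= 1
--     return p & 0xF
--
-- MIX_COL_MATRIX = [
--     [0x1, 0x4],
--     [0x4, 0x1]
-- ]
--
-- def mix_columns_transform(col, matrix):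
--     s0, s1 = col[0], col[1]
--     m = matrix
--     c0 = gf_multiply(m[0][0], s0) ^ gf_multiply(m[0][1], s1)
--     c1 = gf_multiply(m[1][0], s0) ^ gf_multiply(m[1][1], s1)
--     return [c0, c1]
--
-- def mix_columns(state_matrix, mix_matrix=MIX_COL_MATRIX):
--     new_state = [[0, 0], [0, 0]]
--     for c in range(2):
--         col = [state_matrix[0][c], state_matrix[1][c]]
--         new_col = mix_columns_transform(col, mix_matrix)
--         new_state[0][c] = new_col[0]
--         new_state[1][c] = new_col[1]
--     return new_state
-- ===== SOURCE B (Python) =====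
-- # Log/antilog-table implementation of GF(2^4) (poly x^4 + x + 1) MixColumns:
-- # the per-pair shift-and-xor loop is replaced by discrete-log tables built once
-- # at module load; the 2x2 matrix-times-column is a single nested comprehension.
--
-- MIX_COL_MATRIX = [
--     [0x1, 0x4],
--     [0x4, 0x1]
-- ]
--
-- # antilog/log tables for the generator x (=2) of GF(2^4)* under x^4 + x + 1
-- _GF_EXP = []
-- _GF_LOG = [0] * 16
-- _e = 1
-- for _i in range(15):
--     _GF_EXP.append(_e)
--     _GF_LOG[_e] = _i
--     _e <<= 1
--     if _e & 0x10:
--         _e ^= 0b10011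
--
-- def _gf_mul(a, b):
--     a &= 0xF
--     b &= 0xF
--     if a == 0 or b == 0:
--         return 0
--     return _GF_EXP[(_GF_LOG[a] + _GF_LOG[b]) % 15]
--
-- def mix_columns(state_matrix, mix_matrix=MIX_COL_MATRIX):
--     return [[_gf_mul(mix_matrix[i][0], state_matrix[0][c]) ^ _gf_mul(mix_matrix[i][1], state_matrix[1][c])
--              for c in range(2)] for i in range(2)]
-- ===== Notes on version B (the rewrite author's own statement) =====
-- stated objective: alternative
-- what changed: The per-pair 4-iteration shift-and-xor GF(2^4) multiply is replaced by discrete log/antilog tables built once at module load (product = EXP[(LOG[a]+LOG[b]) mod 15] after masking to 4 bits), and the 2x2 matrix-times-state is one nested comprehension instead of in-place cell assignments.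
import Mathlib
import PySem

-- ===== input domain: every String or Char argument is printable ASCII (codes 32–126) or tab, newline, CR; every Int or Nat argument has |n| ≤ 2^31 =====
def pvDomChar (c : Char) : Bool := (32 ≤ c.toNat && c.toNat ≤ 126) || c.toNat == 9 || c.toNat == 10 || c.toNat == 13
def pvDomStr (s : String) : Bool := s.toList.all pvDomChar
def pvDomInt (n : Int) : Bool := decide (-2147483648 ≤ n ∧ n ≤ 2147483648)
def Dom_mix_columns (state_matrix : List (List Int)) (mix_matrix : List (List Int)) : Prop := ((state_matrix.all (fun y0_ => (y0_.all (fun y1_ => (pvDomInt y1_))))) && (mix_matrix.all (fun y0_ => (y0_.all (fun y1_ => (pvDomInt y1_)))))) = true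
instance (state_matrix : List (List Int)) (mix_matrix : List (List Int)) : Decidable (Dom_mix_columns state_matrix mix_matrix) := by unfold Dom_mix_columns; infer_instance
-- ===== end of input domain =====

-- B replaces the per-pair 4-iteration shift-and-xor GF(2^4) multiply by log/antilog
-- tables built once, and the in-place cell assignments by a nested comprehension (objective: alternative).

-- shared transliteration of Python's x[i][j] (both Pythons index the same cells;
-- inside Pre_ every index is in range, so the getD default is never used there)
def pyIdx2 (x : List (List Int)) (i j : Int) : Int :=
  (PySem.List.pyGet? ((PySem.List.pyGet? x i).getD []) j).getD 0

-- ===== PORT A =====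
-- loop body of gf_multiply's `for _ in range(4)` (state = (p, a, b))
def gfStep (s : Int × Int × Int) : Int × Int × Int :=
  let p := s.1
  let a := s.2.1
  let b := s.2.2
  let p := if PySem.Int.band b 1 ≠ 0 then PySem.Int.bxor p a else p
  let hi_bit_set := PySem.Int.band a 8
  let a := a <<< (1 : Nat)
  let a := if hi_bit_set ≠ 0 then PySem.Int.band (PySem.Int.bxor a 3) 15 else a
  (p, a, b >>> (1 : Nat))

def gf_multiply (a b : Int) : Int :=
  let s := (List.range 4).foldl (fun s _ => gfStep s) (0, a, b)
  PySem.Int.band s.1 15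

def mix_columns_transform (col : List Int) (matrix : List (List Int)) : List Int :=
  let s0 := (PySem.List.pyGet? col 0).getD 0
  let s1 := (PySem.List.pyGet? col 1).getD 0
  let m := matrix
  let c0 := PySem.Int.bxor (gf_multiply (pyIdx2 m 0 0) s0) (gf_multiply (pyIdx2 m 0 1) s1)
  let c1 := PySem.Int.bxor (gf_multiply (pyIdx2 m 1 0) s0) (gf_multiply (pyIdx2 m 1 1) s1)
  [c0, c1]

def mix_columns (state_matrix : List (List Int)) (mix_matrix : List (List Int)) : List (List Int) :=
  (List.range 2).foldl (fun (new_state : List (List Int)) (c : Nat) =>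
    let col := [pyIdx2 state_matrix 0 (c : Int), pyIdx2 state_matrix 1 (c : Int)]
    let new_col := mix_columns_transform col mix_matrix
    let new_state := new_state.set 0 ((new_state.getD 0 []).set c ((PySem.List.pyGet? new_col 0).getD 0))
    let new_state := new_state.set 1 ((new_state.getD 1 []).set c ((PySem.List.pyGet? new_col 1).getD 0))
    new_state) [[0, 0], [0, 0]]

-- ===== PORT B =====
-- module-load loop of Source B building (_GF_EXP, _GF_LOG); e stays in 1..15, so
-- `e.toNat` as the List.set index is exactly Python's `_GF_LOG[_e] = _i`
def gf_tables : List Int × List Int :=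
  let s := (List.range 15).foldl
    (fun (s : List Int × List Int × Int) i =>
      let exp := s.1
      let log := s.2.1
      let e := s.2.2
      let exp := exp ++ [e]
      let log := log.set e.toNat (i : Int)
      let e := e <<< (1 : Nat)
      let e := if PySem.Int.band e 16 ≠ 0 then PySem.Int.bxor e 19 else e
      (exp, log, e))
    ([], List.replicate 16 (0 : Int), 1)
  (s.1, s.2.1)

def gf_mul_alt (a b : Int) : Int :=
  let a := PySem.Int.band a 15
  let b := PySem.Int.band b 15
  if a = 0 ∨ b = 0 then 0
  else (PySem.List.pyGet? gf_tables.1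
          (PySem.Int.mod ((PySem.List.pyGet? gf_tables.2 a).getD 0 + (PySem.List.pyGet? gf_tables.2 b).getD 0) 15)).getD 0

def mix_columns_alt (state_matrix : List (List Int)) (mix_matrix : List (List Int)) : List (List Int) :=
  (List.range 2).map (fun i =>
    (List.range 2).map (fun c =>
      PySem.Int.bxor (gf_mul_alt (pyIdx2 mix_matrix (i : Int) 0) (pyIdx2 state_matrix 0 (c : Int)))
                     (gf_mul_alt (pyIdx2 mix_matrix (i : Int) 1) (pyIdx2 state_matrix 1 (c : Int)))))

-- ===== PRECONDITION & SPEC =====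
-- Pre_ = exactly where Python A returns: it raises IndexError unless the state has
-- rows 0 and 1 of length ≥ 2 and the mix matrix has rows 0 and 1 of length ≥ 2.
def Pre_mix_columns (state_matrix : List (List Int)) (mix_matrix : List (List Int)) : Prop :=
  2 ≤ state_matrix.length ∧ 2 ≤ (state_matrix.getD 0 []).length ∧ 2 ≤ (state_matrix.getD 1 []).length ∧
  2 ≤ mix_matrix.length ∧ 2 ≤ (mix_matrix.getD 0 []).length ∧ 2 ≤ (mix_matrix.getD 1 []).length
instance (state_matrix : List (List Int)) (mix_matrix : List (List Int)) : Decidable (Pre_mix_columns state_matrix mix_matrix) := by unfold Pre_mix_columns; infer_instance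

def pvWitness_mix_columns : List (List Int) × List (List Int) := ([[1, 2], [3, 4]], [[1, 4], [4, 1]])

def Spec_mix_columns (state_matrix : List (List Int)) (mix_matrix : List (List Int)) (out : List (List Int)) : Prop := out = mix_columns_alt state_matrix mix_matrix
instance (state_matrix : List (List Int)) (mix_matrix : List (List Int)) (out : List (List Int)) : Decidable (Spec_mix_columns state_matrix mix_matrix out) := by unfold Spec_mix_columns; infer_instance

-- ===== CLAIM (what is proved, stated in full; the proofs are below) =====
def Claim_equal_mix_columns : Prop := ∀ (state_matrix : List (List Int)) (mix_matrix : List (List Int)), Dom_mix_columns state_matrix mix_matrix → Pre_mix_columns state_matrix mix_matrix → Spec_mix_columns state_matrix mix_matrix (mix_columns state_matrix mix_matrix)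

-- ===== LEMMAS AND PROOFS =====

-- low-4-bits view of an Int (Python's value & 0xF)
def pvL (x : Int) : Nat := (x % 16).toNat

theorem pvL_lt (x : Int) : pvL x < 16 := by unfold pvL; omega

theorem pvL_cast (n : Nat) : pvL (n : Int) = n % 16 := by unfold pvL; omega

-- Nat masking facts
theorem natAnd16 (n m : Nat) (hm : m < 16) : n &&& m = n % 16 &&& m := by
  apply Nat.eq_of_testBit_eq
  intro i
  have h16 : (16 : Nat) = 2 ^ 4 := by norm_num
  rw [Nat.testBit_and, Nat.testBit_and, h16, Nat.testBit_mod_two_pow]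
  by_cases hi : i < 4
  · simp [hi]
  · have : m < 2 ^ i := lt_of_lt_of_le hm (by
      calc (16 : Nat) = 2 ^ 4 := by norm_num
      _ ≤ 2 ^ i := Nat.pow_le_pow_right (by norm_num) (by omega))
    simp [Nat.testBit_lt_two_pow this, hi]

theorem natAnd16' (n m : Nat) (hm : m < 16) : m &&& n = m &&& (n % 16) := by
  rw [Nat.and_comm, natAnd16 n m hm, Nat.and_comm]

theorem natXor16 (x y : Nat) : (x ^^^ y) % 16 = (x % 16) ^^^ (y % 16) := by
  apply Nat.eq_of_testBit_eq
  intro i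
  have h16 : (16 : Nat) = 2 ^ 4 := by norm_num
  rw [h16, Nat.testBit_mod_two_pow, Nat.testBit_xor, Nat.testBit_xor,
      Nat.testBit_mod_two_pow, Nat.testBit_mod_two_pow]
  by_cases hi : i < 4 <;> simp [hi]

theorem fin_band : ∀ l < 16, ∀ m < 16, m - (m &&& (15 - l)) = l &&& m := by decide
theorem fin_xor_pn : ∀ lx < 16, ∀ ly < 16, 15 - (lx ^^^ (15 - ly)) = lx ^^^ ly := by decide
theorem fin_xor_np : ∀ lx < 16, ∀ ly < 16, 15 - ((15 - lx) ^^^ ly) = lx ^^^ ly := by decide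
theorem fin_xor_nn : ∀ lx < 16, ∀ ly < 16, ((15 - lx) ^^^ (15 - ly)) % 16 = lx ^^^ ly := by decide
theorem fin_and15 : ∀ l < 16, l &&& 15 = l := by decide

theorem band_L (x : Int) (m : Nat) (hm : m < 16) :
    PySem.Int.band x (m : Int) = ((pvL x &&& m : Nat) : Int) := by
  unfold PySem.Int.band
  by_cases hx : 0 ≤ x
  · have hb : (0 : Int) ≤ (m : Int) := by positivity
    simp only [hx, hb, if_true]
    have h1 : ((m : Int)).toNat = m := by omega
    have h2 : x.toNat &&& m = pvL x &&& m := by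
      rw [natAnd16 x.toNat m hm, natAnd16 (pvL x) m hm]
      have : x.toNat % 16 = pvL x := by unfold pvL; omega
      rw [this]
      have : pvL x % 16 = pvL x := Nat.mod_eq_of_lt (pvL_lt x)
      rw [this]
    rw [h1, h2]
  · have hb : (0 : Int) ≤ (m : Int) := by positivity
    simp only [hx, hb, if_true, if_false]
    have h1 : ((m : Int)).toNat = m := by omega
    rw [h1]
    have h2 : m &&& (-x - 1).toNat = m &&& (15 - pvL x) := by
      rw [natAnd16' ((-x - 1).toNat) m hm]
      congr 1
      unfold pvL; omega
    rw [h2, fin_band (pvL x) (pvL_lt x) m hm]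

theorem bxor_L (x y : Int) : pvL (PySem.Int.bxor x y) = pvL x ^^^ pvL y := by
  unfold PySem.Int.bxor
  by_cases hx : 0 ≤ x <;> by_cases hy : 0 ≤ y
  · simp only [hx, hy, if_true]
    rw [pvL_cast, natXor16]
    congr 1 <;> unfold pvL <;> omega
  · simp only [hx, hy, if_true, if_false]
    have h1 : pvL (-((x.toNat ^^^ (-y - 1).toNat : Nat) : Int) - 1)
        = 15 - (x.toNat ^^^ (-y - 1).toNat) % 16 := by unfold pvL; omega
    rw [h1, natXor16]
    have hx16 : x.toNat % 16 = pvL x := by unfold pvL; omega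
    have hy16 : (-y - 1).toNat % 16 = 15 - pvL y := by unfold pvL; omega
    rw [hx16, hy16, fin_xor_pn (pvL x) (pvL_lt x) (pvL y) (pvL_lt y)]
  · simp only [hx, hy, if_true, if_false]
    have h1 : pvL (-(((-x - 1).toNat ^^^ y.toNat : Nat) : Int) - 1)
        = 15 - ((-x - 1).toNat ^^^ y.toNat) % 16 := by unfold pvL; omega
    rw [h1, natXor16]
    have hx16 : (-x - 1).toNat % 16 = 15 - pvL x := by unfold pvL; omega
    have hy16 : y.toNat % 16 = pvL y := by unfold pvL; omega
    rw [hx16, hy16, fin_xor_np (pvL x) (pvL_lt x) (pvL y) (pvL_lt y)]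
  · simp only [hx, hy, if_false]
    rw [pvL_cast, natXor16]
    have hx16 : (-x - 1).toNat % 16 = 15 - pvL x := by unfold pvL; omega
    have hy16 : (-y - 1).toNat % 16 = 15 - pvL y := by unfold pvL; omega
    rw [hx16, hy16]
    have := fin_xor_nn (pvL x) (pvL_lt x) (pvL y) (pvL_lt y)
    rw [← this, natXor16]
    congr 1 <;> omega

theorem band1_eq (x : Int) : PySem.Int.band x 1 = x % 2 := by
  unfold PySem.Int.band
  have h1 : ((1 : Int)).toNat = 1 := rfl
  by_cases hx : 0 ≤ x
  · simp only [hx, (by norm_num : (0:Int) ≤ 1), if_true]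
    rw [h1, Nat.and_one_is_mod]
    omega
  · simp only [hx, (by norm_num : (0:Int) ≤ 1), if_true, if_false]
    rw [h1, Nat.and_comm, Nat.and_one_is_mod]
    omega

theorem L_shl (x : Int) : pvL (x <<< (1 : Nat)) = 2 * pvL x % 16 := by
  rw [Int.shiftLeft_eq]
  unfold pvL
  norm_num
  omega

-- unrolled-run view of gf_multiply's loop
def gfRun : Nat → Int × Int × Int → Int × Int × Int
  | 0, s => s
  | n + 1, s => gfRun n (gfStep s)

theorem foldl_gfStep (l : List Nat) (s : Int × Int × Int) :
    l.foldl (fun s _ => gfStep s) s = gfRun l.length s := by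
  induction l generalizing s with
  | nil => rfl
  | cons x xs ih => simp [List.foldl, gfRun, ih]

theorem ediv2_mod (k b b' : Int) (_hk : 0 < k) (h : b % (2 * k) = b' % (2 * k)) :
    (b / 2) % k = (b' / 2) % k := by
  have key : ∀ (x : Int), (x / 2) % k = (x % (2 * k) / 2) % k := by
    intro x
    have h0 := Int.mul_ediv_add_emod x (2 * k)
    have hx : x = x % (2 * k) + (k * (x / (2 * k))) * 2 := by
      calc x = 2 * k * (x / (2 * k)) + x % (2 * k) := by linarith
        _ = x % (2 * k) + (k * (x / (2 * k))) * 2 := by ring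
    conv_lhs => rw [hx]
    rw [Int.add_mul_ediv_right _ _ (by norm_num : (2 : Int) ≠ 0)]
    rw [Int.add_mul_emod_self_left]
  rw [key b, key b', h]

theorem gf_inv : ∀ (n : Nat) (p a b p' a' b' : Int),
    pvL p = pvL p' → pvL a = pvL a' → b % (2 ^ n) = b' % (2 ^ n) →
    pvL (gfRun n (p, a, b)).1 = pvL (gfRun n (p', a', b')).1 := by
  intro n
  induction n with
  | zero => intro p a b p' a' b' hp _ _; exact hp
  | succ n ih =>
    intro p a b p' a' b' hp ha hb
    have hdvd : (2 : Int) ∣ 2 ^ (n + 1) := ⟨2 ^ n, by ring⟩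
    have hb2 : b % 2 = b' % 2 := by
      rw [← Int.emod_emod_of_dvd b hdvd, ← Int.emod_emod_of_dvd b' hdvd, hb]
    have hband : PySem.Int.band b 1 = PySem.Int.band b' 1 := by
      rw [band1_eq, band1_eq, hb2]
    have hband8 : PySem.Int.band a 8 = PySem.Int.band a' 8 := by
      rw [show (8 : Int) = ((8 : Nat) : Int) from rfl, band_L a 8 (by norm_num),
          band_L a' 8 (by norm_num), ha]
    have hP : pvL (if PySem.Int.band b 1 ≠ 0 then PySem.Int.bxor p a else p)
        = pvL (if PySem.Int.band b' 1 ≠ 0 then PySem.Int.bxor p' a' else p') := by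
      rw [hband]
      split_ifs with hc
      · rw [bxor_L, bxor_L, hp, ha]
      · exact hp
    have hshl : pvL (a <<< (1 : Nat)) = pvL (a' <<< (1 : Nat)) := by
      rw [L_shl, L_shl, ha]
    have hA : pvL (if PySem.Int.band a 8 ≠ 0 then PySem.Int.band (PySem.Int.bxor (a <<< (1 : Nat)) 3) 15 else a <<< (1 : Nat))
        = pvL (if PySem.Int.band a' 8 ≠ 0 then PySem.Int.band (PySem.Int.bxor (a' <<< (1 : Nat)) 3) 15 else a' <<< (1 : Nat)) := by
      rw [hband8]
      split_ifs with hc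
      · rw [show (15 : Int) = ((15 : Nat) : Int) from rfl, band_L _ 15 (by norm_num),
            band_L _ 15 (by norm_num), pvL_cast, pvL_cast, bxor_L, bxor_L, hshl]
      · exact hshl
    have hB : (b >>> (1 : Nat)) % (2 ^ n) = (b' >>> (1 : Nat)) % (2 ^ n) := by
      have e : ∀ y : Int, y >>> (1 : Nat) = y / 2 := by
        intro y; rw [Int.shiftRight_eq_div_pow]; norm_num
      rw [e, e]
      apply ediv2_mod (2 ^ n) b b' (by positivity)
      have e2 : (2 : Int) * 2 ^ n = 2 ^ (n + 1) := by ring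
      rw [e2]; exact hb
    show pvL (gfRun n (gfStep (p, a, b))).1 = pvL (gfRun n (gfStep (p', a', b'))).1
    simp only [gfStep]
    exact ih _ _ _ _ _ _ hP hA hB

theorem band15_L (x : Int) : PySem.Int.band x 15 = ((pvL x : Nat) : Int) := by
  rw [show (15 : Int) = ((15 : Nat) : Int) from rfl, band_L x 15 (by norm_num),
      fin_and15 (pvL x) (pvL_lt x)]

theorem gf_mask (a b : Int) :
    gf_multiply a b = gf_multiply ((pvL a : Nat) : Int) ((pvL b : Nat) : Int) := by
  unfold gf_multiply
  rw [foldl_gfStep, foldl_gfStep, List.length_range]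
  rw [band15_L, band15_L]
  congr 1
  apply gf_inv 4
  · rfl
  · unfold pvL; omega
  · show b % 2 ^ 4 = (((pvL b : Nat) : Int)) % 2 ^ 4
    unfold pvL; omega

theorem alt_mask (a b : Int) :
    gf_mul_alt a b = gf_mul_alt ((pvL a : Nat) : Int) ((pvL b : Nat) : Int) := by
  have h : ∀ x : Int, PySem.Int.band x 15 = PySem.Int.band ((pvL x : Nat) : Int) 15 := by
    intro x
    rw [band15_L, band15_L]
    congr 1
    unfold pvL; omega
  simp only [gf_mul_alt]
  rw [h a, h b]

theorem gf_small : ∀ la < 16, ∀ lb < 16,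
    gf_multiply ((la : Nat) : Int) ((lb : Nat) : Int) = gf_mul_alt ((la : Nat) : Int) ((lb : Nat) : Int) := by
  decide

theorem gf_eq (a b : Int) : gf_multiply a b = gf_mul_alt a b := by
  rw [gf_mask, alt_mask]
  exact gf_small (pvL a) (pvL_lt a) (pvL b) (pvL_lt b)

-- ===== VERDICT (by name: the statement is the Claim_ definition above) =====
theorem mix_columns_spec : Claim_equal_mix_columns := by
  intro s m _ _
  unfold Spec_mix_columns
  show mix_columns s m = mix_columns_alt s m
  simp [mix_columns, mix_columns_alt, mix_columns_transform, List.range_succ,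
        List.foldl, List.map, PySem.List.pyGet?, PySem.List.pyIdx?, List.set, List.getD, gf_eq]
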